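-- pv_equiv track=rewrite | github.com/dev-hato/hato-bot | library/hukidasi.py | text_length_list
-- ===== SOURCE A (Python) =====
-- import unicodedata
--
-- def text_length_list(text: list) -> list:
--     """
--     各行で何文字あるかリストで返す
--     """
--
--     count_list = list()
--
--     for line in text:
--         count = 0
--
--         for character in line:
--             if unicodedata.east_asian_width(character) in 'FWA':
--                 # 全角は2文字として数える
--                 count += 2
--             else:
--                 # 半角なら1文字として数える
--                 count += 1
--
--         count_list.append(count)
--
--     return count_list
-- ===== SOURCE B (Python) =====
-- import unicodedata
--
--
-- def text_length_list(text: list) -> list: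
--     """Per line: tally character frequencies into a dict, then sum
--     width(c) * multiplicity over the DISTINCT characters, so each distinct
--     character is classified (east_asian_width) only once."""
--     count_list = []
--     for line in text:
--         freq = {}
--         for c in line:
--             freq[c] = freq.get(c, 0) + 1
--         width = 0
--         for c, n in freq.items():
--             width += (2 if unicodedata.east_asian_width(c) in 'FWA' else 1) * n
--         count_list.append(width)
--     return count_list
-- ===== Notes on version B (the rewrite author's own statement) =====
-- stated objective: alternative
-- what changed: Replaces A's per-character 1-or-2 branching accumulator by a two-stage counter algorithm: build a frequency dictionary per line, then sum width(c)*multiplicity over the distinct characters, classifying each distinct character only once.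
import Mathlib
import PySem

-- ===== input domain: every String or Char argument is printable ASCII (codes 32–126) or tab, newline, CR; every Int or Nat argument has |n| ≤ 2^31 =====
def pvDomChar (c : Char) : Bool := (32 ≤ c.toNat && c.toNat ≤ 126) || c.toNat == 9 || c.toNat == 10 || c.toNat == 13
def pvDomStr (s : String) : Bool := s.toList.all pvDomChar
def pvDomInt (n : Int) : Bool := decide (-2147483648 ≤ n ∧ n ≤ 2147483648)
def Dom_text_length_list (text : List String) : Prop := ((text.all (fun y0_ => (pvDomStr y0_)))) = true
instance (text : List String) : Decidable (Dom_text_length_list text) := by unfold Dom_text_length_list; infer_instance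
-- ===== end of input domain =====

-- B replaces A's per-character 1-or-2 accumulator by a two-stage counter algorithm
-- (frequency dict per line, then sum width*multiplicity over distinct chars);
-- objective: alternative (same asymptotic cost).

-- ===== PORT A =====
-- unicodedata.east_asian_width(c) in 'FWA': exact on the ASCII+tab/newline/CR domain
-- (those chars are all 'Na' or 'N', so the test is False there; the first wide
-- block starts at U+1100).
def pvWideFWA (c : Char) : Bool := c.toNat ≥ 0x1100

def text_length_list (text : List String) : List Int :=
  text.foldl (fun count_list line =>
    count_list ++
      [line.toList.foldl
        (fun count character =>
          if pvWideFWA character then count + 2 else count + 1)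
        (0 : Int)]) []

-- ===== PORT B =====
-- (2 if east_asian_width(c) in 'FWA' else 1), same exactness note as above
def pvWidth (c : Char) : Int := if pvWideFWA c then 2 else 1

def text_length_list_alt (text : List String) : List Int :=
  text.foldl (fun count_list line =>
    let freq : PySem.Dict Char Int :=
      line.toList.foldl (fun d c => d.insert c (d.getD c 0 + 1)) PySem.Dict.empty
    let width : Int :=
      freq.items.foldl (fun w p => w + pvWidth p.1 * p.2) 0
    count_list ++ [width]) []

-- ===== PRECONDITION & SPEC =====
def Spec_text_length_list (text : List String) (out : List Int) : Prop := out = text_length_list_alt text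
instance (text : List String) (out : List Int) : Decidable (Spec_text_length_list text out) := by unfold Spec_text_length_list; infer_instance

-- ===== CLAIM (what is proved, stated in full; the proofs are below) =====
def Claim_equal_text_length_list : Prop := ∀ (text : List String), Dom_text_length_list text → Spec_text_length_list text (text_length_list text)

-- ===== LEMMAS AND PROOFS =====

-- A's branching accumulator is the per-character width sum
theorem pv_a_line (cs : List Char) (a : Int) :
    cs.foldl (fun count character =>
        if pvWideFWA character then count + 2 else count + 1) a
      = a + (cs.map pvWidth).sum := by
  induction cs generalizing a with
  | nil => simp
  | cons c cs ih =>
    simp only [List.foldl_cons, List.map_cons, List.sum_cons, ih, pvWidth]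
    by_cases h : pvWideFWA c = true <;> simp [h] <;> ring

-- a one-hot sum over a Nodup list picks out the single matching entry
theorem pv_one_hot (ks : List Char) (c : Char) (x : Int) (hnd : ks.Nodup)
    (hc : c ∈ ks) :
    (ks.map (fun k => if k = c then x else 0)).sum = x := by
  induction ks with
  | nil => simp at hc
  | cons k ks ihk =>
    rcases List.mem_cons.mp hc with h | h
    · subst h
      have hnotin : c ∉ ks := (List.nodup_cons.mp hnd).1
      have hz : (ks.map (fun k => if k = c then x else 0)).sum = 0 := by
        apply List.sum_eq_zero
        intro y hy
        rcases List.mem_map.mp hy with ⟨z, hz, rfl⟩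
        have : z ≠ c := fun h' => hnotin (h' ▸ hz)
        simp [this]
      simp [hz]
    · have hk : k ≠ c := fun hkc => (List.nodup_cons.mp hnd).1 (hkc ▸ h)
      simp [hk, ihk (List.nodup_cons.mp hnd).2 h]

-- summing w(k) * (cs.count k) over any Nodup list of keys containing all of cs
-- gives the per-character width sum
theorem pv_count_sum (cs ks : List Char) (hnd : ks.Nodup)
    (hmem : ∀ c ∈ cs, c ∈ ks) :
    (ks.map (fun k => pvWidth k * (cs.count k : Int))).sum = (cs.map pvWidth).sum := by
  induction cs with
  | nil => simp
  | cons c cs ih =>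
    have hc : c ∈ ks := hmem c (by simp)
    have hrest : ∀ x ∈ cs, x ∈ ks := fun x hx => hmem x (by simp [hx])
    have hsplit : (ks.map (fun k => pvWidth k * ((c :: cs).count k : Int))).sum
        = (ks.map (fun k => pvWidth k * (cs.count k : Int))).sum
          + (ks.map (fun k => if k = c then pvWidth c else 0)).sum := by
      rw [← List.sum_map_add]
      refine congrArg List.sum (List.map_congr_left ?_)
      intro k _
      rw [List.count_cons]
      by_cases h : k = c
      · subst h; simp; ring
      · simp [h, Ne.symm h]
    rw [hsplit, ih hrest, pv_one_hot ks c (pvWidth c) hnd hc]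
    simp [Int.add_comm]

-- B's per-line computation equals the per-character width sum
theorem pv_b_line (cs : List Char) :
    ((cs.foldl (fun (d : PySem.Dict Char Int) c => d.insert c (d.getD c 0 + 1))
        PySem.Dict.empty).items.foldl (fun w p => w + pvWidth p.1 * p.2) 0 : Int)
      = (cs.map pvWidth).sum := by
  rw [PySem.Dict.foldl_insert_getD_add_one_eq_counter, PySem.Dict.items_counter,
    PySem.List.foldl_add]
  simp only [List.map_map, zero_add]
  exact pv_count_sum cs (PySem.Set.ofList cs) (PySem.Set.nodup_ofList cs)
    (fun c hc => (PySem.Set.mem_ofList cs c).mpr hc)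

-- the two outer folds produce the same list
theorem pv_main (text : List String) : text_length_list text = text_length_list_alt text := by
  unfold text_length_list text_length_list_alt
  rw [PySem.List.foldl_append_singleton_eq_map, PySem.List.foldl_append_singleton_eq_map]
  refine List.map_congr_left ?_
  intro line _
  rw [pv_b_line, pv_a_line]
  simp

-- ===== VERDICT (by name: the statement is the Claim_ definition above) =====
theorem text_length_list_spec : Claim_equal_text_length_list := by
  intro text _
  exact pv_main text
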